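-- pv_equiv track=rewrite | github.com/caio1302/sistemavoto | functions/formatters.py | _apply_mask_template
-- ===== SOURCE A (Python) =====
-- def _apply_mask_template(value, template):
--     """
--     Função auxiliar genérica para aplicar máscaras.
--     value: string atual no campo (já contendo apenas dígitos).
--     template: string da máscara (ex: "(##) # ####-####"). '#' indica dígito.
--     """
--     if not value:
--         return ""
--
--     formatted_value = []
--     val_idx = 0
--     for char_template in template:
--         if val_idx >= len(value):
--             break
--
--         if char_template == '#':
--             formatted_value.append(value[val_idx])
--             val_idx += 1
--         else:
--             # Insere o caractere da máscara se ainda houver dígitos para formatar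
--             # ou se for o próximo caractere a ser inserido.
--             if len(formatted_value) < len(template.replace("#", "") + value):
--                  formatted_value.append(char_template)
--
--     return "".join(formatted_value)
-- ===== SOURCE B (Python) =====
-- def _apply_mask_template(value, template):
--     # Value-driven rewrite: walk the digits of `value`, advancing a cursor
--     # through `template`, emitting pending literals before each digit and
--     # stopping entirely when the template is exhausted.
--     if not value:
--         return ""
--     out = []
--     ti = 0
--     n = len(template)
--     for d in value:
--         while ti < n and template[ti] != '#':
--             out.append(template[ti])
--             ti += 1
--         if ti >= n:
--             break
--         out.append(d)
--         ti += 1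
--     return "".join(out)
-- ===== Notes on version B (the rewrite author's own statement) =====
-- stated objective: faster
-- what changed: Inverted the driving structure: A iterates over the template with an index into value, B iterates over the digits of value with an inner scan that emits pending template literals, stopping when the template is exhausted; A's always-true append guard (recomputing template.replace each iteration) disappears.
import Mathlib
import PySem

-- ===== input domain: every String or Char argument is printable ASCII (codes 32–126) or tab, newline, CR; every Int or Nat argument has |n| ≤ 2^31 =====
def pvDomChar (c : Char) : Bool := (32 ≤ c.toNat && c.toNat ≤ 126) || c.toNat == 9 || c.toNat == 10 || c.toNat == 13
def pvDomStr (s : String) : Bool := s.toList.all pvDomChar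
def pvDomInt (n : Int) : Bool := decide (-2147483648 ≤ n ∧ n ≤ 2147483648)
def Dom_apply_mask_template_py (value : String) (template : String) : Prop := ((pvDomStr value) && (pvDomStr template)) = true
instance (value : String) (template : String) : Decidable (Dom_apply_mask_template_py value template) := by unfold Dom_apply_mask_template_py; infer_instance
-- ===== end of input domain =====

-- B inverts A's template-driven loop into a value-driven loop with an inner literal scan (objective: alternative decomposition).

-- ===== PORT A =====
-- A's for-loop over the template with index val_idx into value; `cond` is the
-- constant len(template.replace("#","") + value) recomputed by Python each
-- iteration (it is constant, so it is passed in once).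
def goA (v : List Char) (cond : Nat) : List Char → Nat → List Char → List Char
  | [], _, out => out
  | c :: rest, i, out =>
    if i ≥ v.length then out
    else if c = '#' then
      -- value[val_idx]: the guard ensures i < v.length, so getD is exact here
      goA v cond rest (i + 1) (out ++ [v.getD i ' '])
    else if out.length < cond then goA v cond rest i (out ++ [c])
    else goA v cond rest i out

def apply_mask_template_py (value : String) (template : String) : String :=
  if value = "" then ""
  else String.mk (goA value.toList
    ((PySem.Str.replace template "#" "").toList.length + value.toList.length)
    template.toList 0 [])

-- ===== PORT B =====
-- inner while: emit literals until '#' or template end; returns (emitted, rest)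
def altScan : List Char → List Char × List Char
  | [] => ([], [])
  | c :: rest =>
    if c = '#' then ([], c :: rest)
    else
      let p := altScan rest
      (c :: p.1, p.2)

-- outer for-loop over the digits of value
def goB : List Char → List Char → List Char → List Char
  | [], _, out => out
  | d :: ds, t, out =>
    match altScan t with
    | (ls, []) => out ++ ls
    | (ls, _ :: t') => goB ds t' (out ++ ls ++ [d])

def apply_mask_template_py_alt (value : String) (template : String) : String :=
  if value = "" then ""
  else String.mk (goB value.toList template.toList [])

-- ===== PRECONDITION & SPEC =====
def Spec_apply_mask_template_py (value : String) (template : String) (out : String) : Prop := out = apply_mask_template_py_alt value template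
instance (value : String) (template : String) (out : String) : Decidable (Spec_apply_mask_template_py value template out) := by unfold Spec_apply_mask_template_py; infer_instance

-- ===== CLAIM (what is proved, stated in full; the proofs are below) =====
def Claim_equal_apply_mask_template_py : Prop := ∀ (value : String) (template : String), Dom_apply_mask_template_py value template → Spec_apply_mask_template_py value template (apply_mask_template_py value template)

-- ===== LEMMAS AND PROOFS =====

-- middle form: A's loop with the (always-true) length condition removed and
-- the value index replaced by the remaining suffix of value
def goM : List Char → List Char → List Char → List Char
  | _, [], out => out
  | vs, c :: rest, out =>
    match vs with
    | [] => out
    | d :: vs' =>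
      if c = '#' then goM vs' rest (out ++ [d]) else goM (d :: vs') rest (out ++ [c])

lemma replace_go_hash (fuel : Nat) : ∀ (l acc : List Char), l.length ≤ fuel →
    PySem.Chars.replace.go ['#'] [] fuel l acc
      = acc.reverse ++ l.filter (fun c => c != '#') := by
  induction fuel with
  | zero =>
    intro l acc h
    have : l = [] := List.length_eq_zero_iff.mp (Nat.le_zero.mp h)
    subst this
    simp [PySem.Chars.replace.go]
  | succ n ih =>
    intro l acc h
    cases l with
    | nil => simp [PySem.Chars.replace.go]
    | cons c t =>
      by_cases hc : c = '#'
      · subst hc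
        have hp : List.isPrefixOf ['#'] ('#' :: t) = true := by
          simp [List.isPrefixOf]
        rw [PySem.Chars.replace.go]
        simp only [hp, if_true, List.length_cons, List.drop_succ_cons, List.length_nil, List.drop_zero,
          List.reverse_nil, List.nil_append]
        rw [ih t _ (by simpa using h)]
        simp
      · have hp : List.isPrefixOf ['#'] (c :: t) = false := by
          simp [List.isPrefixOf, Ne.symm hc]
        rw [PySem.Chars.replace.go]
        simp only [hp, Bool.false_eq_true, if_false]
        rw [ih t _ (by simpa using h)]
        simp [hc]

lemma replace_hash_eq_filter (t : List Char) :
    PySem.Chars.replace t ['#'] [] = t.filter (fun c => c != '#') := by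
  rw [PySem.Chars.replace]
  simp only [List.isEmpty_cons, Bool.false_eq_true, if_false]
  simpa using replace_go_hash t.length t [] le_rfl

-- A's loop equals the cleaned loop goM: the append condition is always true
lemma goA_eq_goM (v : List Char) (K : Nat) :
    ∀ (t : List Char) (i : Nat) (out : List Char),
      out.length + (t.filter (fun c => c != '#')).length ≤ i + K →
      goA v (K + v.length) t i out = goM (v.drop i) t out := by
  intro t
  induction t with
  | nil => intro i out _; simp [goA, goM]
  | cons c rest ih =>
    intro i out hinv
    by_cases hi : i ≥ v.length
    · have hdrop : v.drop i = [] := List.drop_eq_nil_of_le hi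
      rw [goA]
      simp [hi, hdrop, goM]
    · push_neg at hi
      have hdrop : v.drop i = v[i] :: v.drop (i + 1) :=
        (List.drop_eq_getElem_cons hi)
      by_cases hc : c = '#'
      · subst hc
        rw [goA]
        simp only [ge_iff_le, Nat.not_le.mpr hi, if_false, if_pos rfl]
        have hget : v.getD i ' ' = v[i] := List.getD_eq_getElem v ' ' hi
        rw [hget, ih (i + 1) (out ++ [v[i]]) (by simp at hinv ⊢; omega)]
        rw [hdrop]
        simp [goM]
      · have hcount : ((c :: rest).filter (fun c => c != '#')).length
            = (rest.filter (fun c => c != '#')).length + 1 := by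
          simp [List.filter_cons, hc]
        have hcond : out.length < K + v.length := by
          rw [hcount] at hinv; omega
        rw [goA]
        simp only [ge_iff_le, Nat.not_le.mpr hi, if_false, if_neg hc, if_pos hcond]
        rw [ih i (out ++ [c]) (by rw [hcount] at hinv; simp; omega)]
        rw [hdrop]
        simp [goM, hc]

lemma goM_eq_goB : ∀ (t vs out : List Char), goM vs t out = goB vs t out := by
  intro t
  induction t with
  | nil =>
    intro vs out
    cases vs with
    | nil => simp [goM, goB]
    | cons d ds => simp [goM, goB, altScan]
  | cons c rest ih =>
    intro vs out
    cases vs with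
    | nil => cases rest <;> simp [goM, goB]
    | cons d ds =>
      by_cases hc : c = '#'
      · subst hc
        rw [goM, goB]
        simp only [altScan, if_pos rfl, if_true]
        simpa using ih ds (out ++ [d])
      · rw [goM]
        simp only [if_neg hc]
        rw [ih (d :: ds) (out ++ [c])]
        rw [goB, goB]
        simp only [altScan, if_neg hc]
        cases h : altScan rest with
        | mk ls t' =>
          cases t' with
          | nil => simp
          | cons x t'' => simp

-- ===== VERDICT (by name: the statement is the Claim_ definition above) =====
theorem apply_mask_template_py_spec : Claim_equal_apply_mask_template_py := by
  intro value template _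
  unfold Spec_apply_mask_template_py apply_mask_template_py apply_mask_template_py_alt
  by_cases hv : value = ""
  · simp [hv]
  · simp only [hv, if_false]
    congr 1
    have hrep : (PySem.Str.replace template "#" "").toList.length
        = (template.toList.filter (fun c => c != '#')).length := by
      rw [PySem.Str.toList_replace]
      have h1 : ("#" : String).toList = ['#'] := rfl
      have h2 : ("" : String).toList = [] := rfl
      rw [h1, h2, replace_hash_eq_filter]
    rw [hrep]
    rw [goA_eq_goM value.toList _ template.toList 0 [] (by simp)]
    simp [goM_eq_goB]
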